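-- pv_equiv track=rewrite | github.com/heyzgj/clawroom | archive/2026-04-08-pre-v2-cleanup/scripts/scripts/autoresearch_sync_demo/common.py | split_assignment_text
-- ===== SOURCE A (Python) =====
-- def split_assignment_text(raw: str) -> tuple[str, str]:
--     focus = ""
--     constraints = ""
--     chunks = [chunk.strip() for chunk in raw.replace("\n", ";").split(";") if chunk.strip()]
--     for chunk in chunks:
--         lower = chunk.lower()
--         if lower.startswith("focus:"):
--             focus = chunk.split(":", 1)[1].strip()
--         elif lower.startswith("constraints:"):
--             constraints = chunk.split(":", 1)[1].strip()
--     if not focus: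
--         focus = raw.strip()
--     return focus, constraints
-- ===== SOURCE B (Python) =====
-- def split_assignment_text(raw: str) -> tuple[str, str]:
--     # One generic pass: build a key->value table from the chunks, then look up the two keys.
--     table = {}
--     for part in raw.replace("\n", ";").split(";"):
--         chunk = part.strip()
--         if chunk and ":" in chunk:
--             key, value = chunk.split(":", 1)
--             table[key.lower()] = value.strip()
--     focus = table.get("focus", "")
--     constraints = table.get("constraints", "")
--     if not focus:
--         focus = raw.strip()
--     return focus, constraints
-- ===== Notes on version B (the rewrite author's own statement) =====
-- stated objective: idiomatic
-- what changed: Replaces the branch-per-key scan (if/elif startswith per chunk) by a generic one-pass key:value table build followed by two dictionary lookups.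
import Mathlib
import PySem

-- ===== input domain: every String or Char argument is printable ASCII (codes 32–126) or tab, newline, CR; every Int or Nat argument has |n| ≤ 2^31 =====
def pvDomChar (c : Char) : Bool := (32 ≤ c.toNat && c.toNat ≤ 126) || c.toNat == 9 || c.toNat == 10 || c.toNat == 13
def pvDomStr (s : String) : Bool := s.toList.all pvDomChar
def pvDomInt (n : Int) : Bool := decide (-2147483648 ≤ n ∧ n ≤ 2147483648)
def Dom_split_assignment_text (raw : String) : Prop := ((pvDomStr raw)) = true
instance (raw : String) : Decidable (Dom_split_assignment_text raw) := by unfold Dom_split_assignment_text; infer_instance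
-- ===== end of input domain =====

-- B replaces A's branch-per-key chunk scan by a generic key:value table built in one pass plus two lookups (objective: idiomatic).

-- ===== PORT A =====
-- chunk.split(":", 1)[i]  (both programs evaluate this only where part i exists, so List.getD "" is exact there)
def pvPart (chunk : String) (i : Nat) : String :=
  ((PySem.Str.splitMax? chunk ":" 1).getD []).getD i ""

-- the body of A's for-loop over the chunks (state = (focus, constraints))
def pvStepA (st : String × String) (chunk : String) : String × String :=
  let lower := PySem.Str.lower chunk
  if PySem.Str.startswith lower "focus:" then (PySem.Str.strip (pvPart chunk 1), st.2)
  else if PySem.Str.startswith lower "constraints:" then (st.1, PySem.Str.strip (pvPart chunk 1))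
  else st

def split_assignment_text (raw : String) : String × String :=
  -- ";" is non-empty, so split? is always some and getD [] is exact
  let chunks := (((PySem.Str.split? (PySem.Str.replace raw "\n" ";") ";").getD []).map PySem.Str.strip).filter (fun s => s != "")
  let st := chunks.foldl pvStepA ("", "")
  let focus := if st.1 == "" then PySem.Str.strip raw else st.1
  (focus, st.2)

-- ===== PORT B =====
-- the body of B's for-loop over the raw parts: strip, then record key:value in the table
def pvStepB (d : PySem.Dict String String) (part : String) : PySem.Dict String String :=
  let chunk := PySem.Str.strip part
  if chunk != "" && PySem.Str.isIn ":" chunk then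
    d.insert (PySem.Str.lower (pvPart chunk 0)) (PySem.Str.strip (pvPart chunk 1))
  else d

def split_assignment_text_alt (raw : String) : String × String :=
  let table := ((PySem.Str.split? (PySem.Str.replace raw "\n" ";") ";").getD []).foldl pvStepB PySem.Dict.empty
  let focus := table.getD "focus" ""
  let constraints := table.getD "constraints" ""
  (if focus == "" then PySem.Str.strip raw else focus, constraints)

-- ===== PRECONDITION & SPEC =====
def Spec_split_assignment_text (raw : String) (out : String × String) : Prop := out = split_assignment_text_alt raw
instance (raw : String) (out : String × String) : Decidable (Spec_split_assignment_text raw out) := by unfold Spec_split_assignment_text; infer_instance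

-- ===== CLAIM (what is proved, stated in full; the proofs are below) =====
def Claim_equal_split_assignment_text : Prop := ∀ (raw : String), Dom_split_assignment_text raw → Spec_split_assignment_text raw (split_assignment_text raw)

-- ===== LEMMAS AND PROOFS =====

theorem pv_toList_colon : (":" : String).toList = [':'] := by decide

-- splitOnMax.go with 0 splits left returns the rest as one piece
theorem pv_go_zero (fuel : Nat) (l cur : List Char) (acc : List (List Char)) :
    PySem.Chars.splitOnMax.go [':'] fuel 0 l cur acc = ((cur.reverse ++ l) :: acc).reverse := by
  cases fuel with
  | zero => rw [PySem.Chars.splitOnMax.go]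
  | succ n =>
    cases l with
    | nil => rw [PySem.Chars.splitOnMax.go] <;> simp
    | cons c rest => rw [PySem.Chars.splitOnMax.go] <;> simp

-- splitOnMax.go with 1 split left cuts at the first ':'
theorem pv_go_one (l : List Char) : ∀ (fuel : Nat), l.length ≤ fuel → ∀ (cur : List Char) (acc : List (List Char)),
    PySem.Chars.splitOnMax.go [':'] fuel 1 l cur acc =
      acc.reverse ++ [cur.reverse ++ l.takeWhile (fun c => c != ':')] ++
        (if ':' ∈ l then [(l.dropWhile (fun c => c != ':')).tail] else []) := by
  induction l with
  | nil =>
    intro fuel h cur acc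
    cases fuel with
    | zero => rw [PySem.Chars.splitOnMax.go] <;> simp
    | succ n => rw [PySem.Chars.splitOnMax.go] <;> simp
  | cons c rest ih =>
    intro fuel h cur acc
    cases fuel with
    | zero => simp at h
    | succ n =>
      rw [PySem.Chars.splitOnMax.go]
      by_cases hc : c = ':'
      · subst hc
        simp [List.isPrefixOf, pv_go_zero]
      · have hrest : rest.length ≤ n := by
          simp only [List.length_cons] at h; omega
        simp [List.isPrefixOf, hc, Ne.symm hc, ih n hrest]

-- chunk.split(":", 1) characterised
theorem pv_splitOnMax_one (cs : List Char) :
    PySem.Chars.splitOnMax cs [':'] 1 =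
      [cs.takeWhile (fun c => c != ':')] ++
        (if ':' ∈ cs then [(cs.dropWhile (fun c => c != ':')).tail] else []) := by
  simpa [PySem.Chars.splitOnMax] using pv_go_one cs (cs.length + 1) (by omega) [] []

theorem pv_pvPart_zero (chunk : String) :
    pvPart chunk 0 = String.ofList (chunk.toList.takeWhile (fun c => c != ':')) := by
  unfold pvPart
  by_cases hm : ':' ∈ chunk.toList <;>
    simp [PySem.Str.splitMax?, PySem.Chars.splitMax?, pv_toList_colon, pv_splitOnMax_one, hm]

theorem pv_toNat_ofNat (n : Nat) (h : n < 55296) : (Char.ofNat n).toNat = n := by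
  unfold Char.ofNat
  rw [dif_pos (Or.inl h)]
  simp [Char.ofNatAux, Char.toNat]

-- lowering a character yields ':' only for ':'
theorem pv_lowerChar_colon (c : Char) : PySem.Chars.lowerChar c = ':' ↔ c = ':' := by
  unfold PySem.Chars.lowerChar
  split_ifs with h
  · have hb : 65 ≤ c.toNat ∧ c.toNat ≤ 90 := by
      unfold PySem.Chars.isupper at h
      simp [Char.le_def, UInt32.le_iff_toNat_le] at h
      exact ⟨h.1, h.2⟩
    constructor
    · intro he
      have h58 : (Char.ofNat (c.toNat + 32)).toNat = (':' : Char).toNat := by rw [he]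
      rw [pv_toNat_ofNat _ (by omega)] at h58
      have hcol : (':' : Char).toNat = 58 := by decide
      omega
    · intro hc
      subst hc
      exact absurd hb (by decide)
  · exact Iff.rfl

theorem pv_mem_lower (cs : List Char) : ':' ∈ PySem.Chars.lower cs ↔ ':' ∈ cs := by
  unfold PySem.Chars.lower
  simp only [List.mem_map]
  constructor
  · rintro ⟨x, hx, he⟩
    rwa [(pv_lowerChar_colon x).mp he] at hx
  · intro h
    exact ⟨':', h, (pv_lowerChar_colon ':').mpr rfl⟩

-- decomposition of a chunk at its first ':'
theorem pv_colon_decomp (cs : List Char) (h : ':' ∈ cs) :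
    cs = cs.takeWhile (fun c => c != ':') ++ ':' :: (cs.dropWhile (fun c => c != ':')).tail := by
  have hne : cs.dropWhile (fun c => c != ':') ≠ [] := by
    intro he
    rw [List.dropWhile_eq_nil_iff] at he
    simpa using he ':' h
  have hh : (cs.dropWhile (fun c => c != ':')).head hne = ':' := by
    have := List.head_dropWhile_not (fun c => c != ':') (l := cs) hne
    simpa using this
  conv_lhs => rw [← List.takeWhile_append_dropWhile (p := fun c => c != ':') (l := cs)]
  congr 1
  exact (List.cons_head_tail hne).symm.trans (by rw [hh])

theorem pv_not_colon_takeWhile (cs : List Char) : ':' ∉ cs.takeWhile (fun c => c != ':') := by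
  intro h
  have := List.mem_takeWhile_imp h
  simp at this

theorem pv_takeWhile_colon (w z : List Char) (hw : ':' ∉ w) :
    (w ++ ':' :: z).takeWhile (fun c => c != ':') = w := by
  induction w with
  | nil => simp
  | cons a w ih =>
    simp only [List.mem_cons, not_or] at hw
    have ha : a ≠ ':' := fun e => hw.1 e.symm
    simp [ha, ih hw.2]

-- "key:" is a prefix of "u:v" (no ':' in key, u) iff u = key
theorem pv_prefix_colon (key u v : List Char) (hkey : ':' ∉ key) (hu : ':' ∉ u) :
    (key ++ [':']) <+: (u ++ ':' :: v) ↔ u = key := by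
  constructor
  · rintro ⟨t, ht⟩
    have h1 := pv_takeWhile_colon u v hu
    have h2 : (key ++ [':'] ++ t).takeWhile (fun c => c != ':') = key := by
      have := pv_takeWhile_colon key t hkey
      simpa using this
    rw [ht, h1] at h2
    exact h2
  · rintro rfl
    exact ⟨v, by simp⟩

-- A's guard, characterised through B's key (the lowered text before the first ':')
theorem pv_startswith_iff (cs key : List Char) (hkey : ':' ∉ key) (h : ':' ∈ cs) :
    (PySem.Chars.startswith (PySem.Chars.lower cs) (key ++ [':']) = true) ↔
      PySem.Chars.lower (cs.takeWhile (fun c => c != ':')) = key := by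
  have hlow : ∀ u v : List Char,
      PySem.Chars.lower (u ++ ':' :: v) = PySem.Chars.lower u ++ ':' :: PySem.Chars.lower v := by
    intro u v
    unfold PySem.Chars.lower
    simp [show PySem.Chars.lowerChar ':' = ':' from by decide]
  rw [show PySem.Chars.startswith (PySem.Chars.lower cs) (key ++ [':']) =
      (key ++ [':']).isPrefixOf (PySem.Chars.lower cs) from rfl]
  rw [List.isPrefixOf_iff_prefix]
  conv_lhs => rw [pv_colon_decomp cs h]
  rw [hlow]
  exact pv_prefix_colon key _ _ hkey
    (fun hm => pv_not_colon_takeWhile cs ((pv_mem_lower _).mp hm))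

theorem pv_startswith_false (cs key : List Char) (h : ':' ∉ cs) :
    PySem.Chars.startswith (PySem.Chars.lower cs) (key ++ [':']) = false := by
  rw [show PySem.Chars.startswith (PySem.Chars.lower cs) (key ++ [':']) =
      (key ++ [':']).isPrefixOf (PySem.Chars.lower cs) from rfl]
  by_contra hb
  simp only [Bool.not_eq_false, List.isPrefixOf_iff_prefix] at hb
  have : ':' ∈ PySem.Chars.lower cs := hb.subset (by simp)
  exact h ((pv_mem_lower cs).mp this)

theorem pv_bridge_startswith (ch : String) (key keyc : String) (hks : keyc.toList = key.toList ++ [':']) :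
    PySem.Str.startswith (PySem.Str.lower ch) keyc =
      PySem.Chars.startswith (PySem.Chars.lower ch.toList) (key.toList ++ [':']) := by
  simp [PySem.Str.startswith, PySem.Str.lower, String.toList_ofList, hks]

theorem pv_lower_ofList (u : List Char) :
    PySem.Str.lower (String.ofList u) = String.ofList (PySem.Chars.lower u) := by
  unfold PySem.Str.lower
  rw [String.toList_ofList]

theorem pv_key_ne (u : List Char) (k : String) (hne : u ≠ k.toList) : String.ofList u ≠ k := by
  intro he
  apply hne
  rw [← he, String.toList_ofList]

-- the synchronisation of one loop step
theorem pv_step (d : PySem.Dict String String) (p : String) (hch : ¬ (PySem.Str.strip p = "")) :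
    ((pvStepB d p).getD "focus" "", (pvStepB d p).getD "constraints" "") =
      pvStepA (d.getD "focus" "", d.getD "constraints" "") (PySem.Str.strip p) := by
  have hchb : (PySem.Str.strip p != "") = true := by simpa using hch
  by_cases hcol : ':' ∈ (PySem.Str.strip p).toList
  · have hIs : PySem.Str.isIn ":" (PySem.Str.strip p) = true := by
      unfold PySem.Str.isIn
      rw [pv_toList_colon]
      exact (PySem.Chars.isIn_iff_infix _ _).mpr ((List.singleton_infix_iff _ _).mpr hcol)
    have hfoc : (PySem.Str.startswith (PySem.Str.lower (PySem.Str.strip p)) "focus:" = true) ↔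
        PySem.Chars.lower ((PySem.Str.strip p).toList.takeWhile (fun c => c != ':')) = "focus".toList := by
      rw [pv_bridge_startswith _ "focus" "focus:" (by decide)]
      exact pv_startswith_iff _ _ (by decide) hcol
    have hcons : (PySem.Str.startswith (PySem.Str.lower (PySem.Str.strip p)) "constraints:" = true) ↔
        PySem.Chars.lower ((PySem.Str.strip p).toList.takeWhile (fun c => c != ':')) = "constraints".toList := by
      rw [pv_bridge_startswith _ "constraints" "constraints:" (by decide)]
      exact pv_startswith_iff _ _ (by decide) hcol
    have hkey : PySem.Str.lower (pvPart (PySem.Str.strip p) 0) =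
        String.ofList (PySem.Chars.lower ((PySem.Str.strip p).toList.takeWhile (fun c => c != ':'))) := by
      rw [pv_pvPart_zero, pv_lower_ofList]
    unfold pvStepB pvStepA
    simp only [hchb, hIs, Bool.and_self, if_true]
    by_cases hF : PySem.Chars.lower ((PySem.Str.strip p).toList.takeWhile (fun c => c != ':')) = "focus".toList
    · have hkF : PySem.Str.lower (pvPart (PySem.Str.strip p) 0) = "focus" := by
        rw [hkey, hF, String.ofList_toList]
      rw [hkF, if_pos (hfoc.mpr hF)]
      rw [PySem.Dict.getD_insert_self,
        PySem.Dict.getD_insert_of_ne _ _ _ (by decide : ("constraints" : String) ≠ "focus")]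
    · by_cases hC : PySem.Chars.lower ((PySem.Str.strip p).toList.takeWhile (fun c => c != ':')) = "constraints".toList
      · have hkC : PySem.Str.lower (pvPart (PySem.Str.strip p) 0) = "constraints" := by
          rw [hkey, hC, String.ofList_toList]
        rw [hkC, if_neg (fun hs => hF (hfoc.mp hs)), if_pos (hcons.mpr hC)]
        rw [PySem.Dict.getD_insert_self,
          PySem.Dict.getD_insert_of_ne _ _ _ (by decide : ("focus" : String) ≠ "constraints")]
      · rw [hkey, if_neg (fun hs => hF (hfoc.mp hs)), if_neg (fun hs => hC (hcons.mp hs))]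
        rw [PySem.Dict.getD_insert_of_ne _ _ _ (Ne.symm (pv_key_ne _ "focus" hF)),
          PySem.Dict.getD_insert_of_ne _ _ _ (Ne.symm (pv_key_ne _ "constraints" hC))]
  · have hIs : PySem.Str.isIn ":" (PySem.Str.strip p) = false := by
      unfold PySem.Str.isIn
      rw [pv_toList_colon, PySem.Chars.isIn_eq_false_iff, List.singleton_infix_iff]
      exact hcol
    have hfoc : PySem.Str.startswith (PySem.Str.lower (PySem.Str.strip p)) "focus:" = false := by
      rw [pv_bridge_startswith _ "focus" "focus:" (by decide)]
      exact pv_startswith_false _ _ hcol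
    have hcons : PySem.Str.startswith (PySem.Str.lower (PySem.Str.strip p)) "constraints:" = false := by
      rw [pv_bridge_startswith _ "constraints" "constraints:" (by decide)]
      exact pv_startswith_false _ _ hcol
    simp at hIs hfoc hcons
    unfold pvStepB pvStepA
    simp [hIs, hfoc, hcons]

-- the loop invariant: the table's two entries track A's two accumulators
theorem pv_inv (ps : List String) (d : PySem.Dict String String) :
    ((ps.foldl pvStepB d).getD "focus" "", (ps.foldl pvStepB d).getD "constraints" "") =
      ((ps.map PySem.Str.strip).filter (fun s => s != "")).foldl pvStepA
        (d.getD "focus" "", d.getD "constraints" "") := by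
  induction ps generalizing d with
  | nil => simp
  | cons p ps ih =>
    simp only [List.foldl_cons, List.map_cons, List.filter_cons]
    by_cases hch : PySem.Str.strip p = ""
    · have hB : pvStepB d p = d := by
        unfold pvStepB
        simp [hch]
      rw [hB, hch]
      simpa using ih d
    · have hcond : (PySem.Str.strip p != "") = true := by simpa using hch
      rw [hcond]
      simp only [if_true, List.foldl_cons]
      rw [ih (pvStepB d p), pv_step d p hch]

-- ===== VERDICT (by name: the statement is the Claim_ definition above) =====
theorem split_assignment_text_spec : Claim_equal_split_assignment_text := by
  intro raw _
  unfold Spec_split_assignment_text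
  simp only [split_assignment_text, split_assignment_text_alt]
  have h := pv_inv ((PySem.Str.split? (PySem.Str.replace raw "\n" ";") ";").getD []) PySem.Dict.empty
  simp only [PySem.Dict.getD_empty] at h
  have h1 := congrArg Prod.fst h
  have h2 := congrArg Prod.snd h
  dsimp only at h1 h2
  rw [h1, h2]
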